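-- pv_equiv track=rewrite | github.com/SoftwareLogico/omni-cli | omni_cli/query.py | _strip_reasoning_overlap
-- ===== SOURCE A (Python) =====
-- def _strip_reasoning_overlap(existing_text: str, incoming_text: str) -> str:
--     if not incoming_text:
--         return ""
--
--     if not existing_text:
--         return incoming_text
--
--     max_overlap = min(len(existing_text), len(incoming_text))
--     for overlap in range(max_overlap, 0, -1):
--         if existing_text.endswith(incoming_text[:overlap]):
--             return incoming_text[overlap:]
--     return incoming_text
-- ===== SOURCE B (Python) =====
-- def _strip_reasoning_overlap(existing_text: str, incoming_text: str) -> str: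
--     # KMP prefix function on incoming + sentinel + existing: the prefix-function
--     # value at the last position is the longest overlap (longest suffix of
--     # existing that is a prefix of incoming); O(n) instead of A's O(n^2).
--     s = incoming_text + "\x00" + existing_text
--     pi = [0] * len(s)
--     k = 0
--     for i in range(1, len(s)):
--         while k > 0 and s[i] != s[k]:
--             k = pi[k - 1]
--         if s[i] == s[k]:
--             k += 1
--         pi[i] = k
--     return incoming_text[k:]
-- ===== Notes on version B (the rewrite author's own statement) =====
-- stated objective: faster
-- what changed: A tries every overlap length from largest down, re-comparing a prefix/suffix pair each time; B computes the longest overlap in one KMP prefix-function pass over incoming + '\x00' + existing, linear in the input length.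
import Mathlib
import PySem

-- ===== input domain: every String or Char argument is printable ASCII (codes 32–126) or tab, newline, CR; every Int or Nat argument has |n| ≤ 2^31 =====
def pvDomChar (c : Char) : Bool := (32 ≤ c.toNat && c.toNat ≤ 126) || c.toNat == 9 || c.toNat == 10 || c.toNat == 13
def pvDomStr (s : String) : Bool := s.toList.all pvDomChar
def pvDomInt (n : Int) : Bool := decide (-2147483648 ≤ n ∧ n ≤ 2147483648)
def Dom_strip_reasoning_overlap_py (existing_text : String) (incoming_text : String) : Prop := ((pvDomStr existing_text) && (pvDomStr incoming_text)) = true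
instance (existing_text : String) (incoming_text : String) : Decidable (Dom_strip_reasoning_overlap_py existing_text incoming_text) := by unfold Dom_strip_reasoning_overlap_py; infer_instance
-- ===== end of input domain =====

-- B replaces A's descending brute-force overlap scan by a single KMP prefix-function
-- pass over incoming + '\x00' + existing (same return value on the whole domain).

-- ===== PORT A =====
-- 'for overlap in range(max_overlap, 0, -1): if existing.endswith(incoming[:overlap]): return incoming[overlap:]'
def pvALoop (existing incoming : List Char) : List Int → List Char
  | [] => incoming
  | ov :: rest =>
      if PySem.Chars.endswith existing (PySem.List.slice incoming none (some ov)) then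
        PySem.List.slice incoming (some ov) none
      else pvALoop existing incoming rest

def strip_reasoning_overlap_py (existing_text : String) (incoming_text : String) : String :=
  let incoming := incoming_text.toList
  let existing := existing_text.toList
  if incoming = [] then ""
  else if existing = [] then incoming_text
  else
    let max_overlap : Int := min (existing.length : Int) (incoming.length : Int)
    String.ofList (pvALoop existing incoming (PySem.List.pyRange max_overlap 0 (-1)))

-- ===== PORT B =====
-- 'while k > 0 and s[i] != s[k]: k = pi[k - 1]'  (fuel = the entry value of k; the loop
-- strictly decreases k, so this fuel is enough and the guard only makes the loop total;
-- indices are always in range in Python, so getD defaults are never consulted there)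
def pvKmpWhile (s : List Char) (pi : List Nat) (c : Char) : Nat → Nat → Nat
  | 0, k => k
  | fuel + 1, k =>
      if 0 < k ∧ c ≠ s.getD k ' ' then pvKmpWhile s pi c fuel (pi.getD (k - 1) 0)
      else k

-- one iteration of 'for i in range(1, len(s))'
def pvKmpStep (s : List Char) (st : Nat × List Nat) (i : Nat) : Nat × List Nat :=
  let c := s.getD i ' '
  let k := pvKmpWhile s st.2 c st.1 st.1
  let k := if c = s.getD k ' ' then k + 1 else k
  (k, st.2.set i k)

-- the final value of k (pi is the prefix-function table)
def pvKmpB (s : List Char) : Nat :=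
  ((List.range' 1 (s.length - 1)).foldl (pvKmpStep s) (0, List.replicate s.length 0)).1

def strip_reasoning_overlap_py_alt (existing_text : String) (incoming_text : String) : String :=
  let incoming := incoming_text.toList
  let s := incoming ++ '\x00' :: existing_text.toList
  let k := pvKmpB s
  String.ofList (PySem.List.slice incoming (some (k : Int)) none)

-- ===== PRECONDITION & SPEC =====
def Spec_strip_reasoning_overlap_py (existing_text : String) (incoming_text : String) (out : String) : Prop := out = strip_reasoning_overlap_py_alt existing_text incoming_text
instance (existing_text : String) (incoming_text : String) (out : String) : Decidable (Spec_strip_reasoning_overlap_py existing_text incoming_text out) := by unfold Spec_strip_reasoning_overlap_py; infer_instance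

-- ===== CLAIM (what is proved, stated in full; the proofs are below) =====
def Claim_equal_strip_reasoning_overlap_py : Prop := ∀ (existing_text : String) (incoming_text : String), Dom_strip_reasoning_overlap_py existing_text incoming_text → Spec_strip_reasoning_overlap_py existing_text incoming_text (strip_reasoning_overlap_py existing_text incoming_text)

-- ===== LEMMAS AND PROOFS =====

-- proper border of t of length k: t.take k is also a suffix of t, k < |t|
def pvPb (t : List Char) (k : Nat) : Bool :=
  decide (k < t.length) && decide (t.take k = t.drop (t.length - k))

-- longest proper border length (0 for nonempty t at worst)
def pvLb (t : List Char) : Nat := Nat.findGreatest (fun k => pvPb t k = true) (t.length - 1)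

-- overlap predicate the task is about: incoming[:k] is a suffix of existing
def pvOv (existing incoming : List Char) (k : Nat) : Bool :=
  decide (k ≤ incoming.length) && decide (k ≤ existing.length) &&
  decide (incoming.take k = existing.drop (existing.length - k))

lemma pvPb_iff (t : List Char) (k : Nat) :
    pvPb t k = true ↔ k < t.length ∧ t.take k = t.drop (t.length - k) := by
  simp [pvPb]

lemma pvPb_zero (t : List Char) (ht : t ≠ []) : pvPb t 0 = true := by
  rcases t with _ | ⟨a, t⟩
  · simp at ht
  · simp [pvPb]

lemma pvLb_le (t : List Char) : pvLb t ≤ t.length - 1 := Nat.findGreatest_le _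

lemma pvLb_spec (t : List Char) (ht : t ≠ []) : pvPb t (pvLb t) = true := by
  exact Nat.findGreatest_spec (P := fun k => pvPb t k = true) (m := 0) (Nat.zero_le _) (pvPb_zero t ht)

lemma pvLb_is_greatest (t : List Char) (k : Nat) (hk : pvPb t k = true) : k ≤ pvLb t := by
  have h1 := (pvPb_iff t k).mp hk
  exact Nat.le_findGreatest (by omega) hk

-- borders are transitive: a border of t.take k, k border of t, is a border of t
lemma pv_border_trans (t : List Char) (k j : Nat)
    (hk : k ≤ t.length) (hkb : t.take k = t.drop (t.length - k))
    (hj : j ≤ k) (hjb : (t.take k).take j = (t.take k).drop (k - j)) :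
    t.take j = t.drop (t.length - j) := by
  calc t.take j = (t.take k).take j := by rw [List.take_take, min_eq_left hj]
    _ = (t.take k).drop (k - j) := hjb
    _ = (t.drop (t.length - k)).drop (k - j) := by rw [hkb]
    _ = t.drop (t.length - j) := by rw [List.drop_drop]; congr 1; omega

-- a shorter border is a border of a longer border
lemma pv_border_of_border (t : List Char) (k j : Nat)
    (hk : k ≤ t.length) (hkb : t.take k = t.drop (t.length - k))
    (hj : j ≤ k) (hjb : t.take j = t.drop (t.length - j)) :
    (t.take k).take j = (t.take k).drop (k - j) := by
  rw [List.take_take, min_eq_left hj, hkb, List.drop_drop, hjb]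
  congr 1
  omega

-- borders of t ++ [c] of positive length
lemma pv_border_snoc (t : List Char) (c : Char) (m : Nat) :
    pvPb (t ++ [c]) (m + 1) = true ↔
      m < t.length ∧ t.take m = t.drop (t.length - m) ∧ t[m]? = some c := by
  rw [pvPb_iff]
  have hlen : (t ++ [c]).length = t.length + 1 := by simp
  constructor
  · rintro ⟨h1, h2⟩
    have hm : m < t.length := by omega
    have hsome : t[m]? = some t[m] := List.getElem?_eq_getElem hm
    rw [hlen, List.take_append_of_le_length (by omega), List.take_succ, hsome,
        show t.length + 1 - (m + 1) = t.length - m by omega, List.drop_append,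
        show t.length - m - t.length = 0 by omega, List.drop_zero] at h2
    simp only [Option.toList_some] at h2
    rw [← List.concat_eq_append, ← List.concat_eq_append, List.concat_inj] at h2
    exact ⟨hm, h2.1, hsome.trans (congrArg some h2.2)⟩
  · rintro ⟨hm, hb, hc⟩
    refine ⟨by omega, ?_⟩
    rw [hlen, List.take_append_of_le_length (by omega), List.take_succ, hc,
        show t.length + 1 - (m + 1) = t.length - m by omega, List.drop_append,
        show t.length - m - t.length = 0 by omega, List.drop_zero]
    simp only [Option.toList_some]
    rw [hb]

lemma pv_findGreatest_eq {P : Nat → Prop} [DecidablePred P] {b v : Nat}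
    (hv : P v) (hvb : v ≤ b) (hmax : ∀ m, m ≤ b → P m → m ≤ v) :
    Nat.findGreatest P b = v := by
  rw [Nat.findGreatest_eq_iff]
  exact ⟨hvb, fun _ => hv, fun n hvn hnb hp => absurd (hmax n hnb hp) (by omega)⟩

lemma pv_findGreatest_congr {P Q : Nat → Prop} [DecidablePred P] [DecidablePred Q] (b : Nat)
    (h : ∀ k, k ≤ b → (P k ↔ Q k)) : Nat.findGreatest P b = Nat.findGreatest Q b := by
  induction b with
  | zero => simp
  | succ n ih =>
      rw [Nat.findGreatest_succ, Nat.findGreatest_succ, ih (fun k hk => h k (by omega))]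
      by_cases hp : P (n + 1)
      · rw [if_pos hp, if_pos ((h (n+1) le_rfl).mp hp)]
      · rw [if_neg hp, if_neg (fun hq => hp ((h (n+1) le_rfl).mpr hq))]

lemma pv_findGreatest_shrink {P : Nat → Prop} [DecidablePred P] {b1 b2 : Nat}
    (hle : ∀ k, P k → k ≤ b2) (hb : b2 ≤ b1) :
    Nat.findGreatest P b1 = Nat.findGreatest P b2 := by
  obtain ⟨h2b, h2p, h2max⟩ := Nat.findGreatest_eq_iff.mp (rfl : Nat.findGreatest P b2 = _)
  rw [Nat.findGreatest_eq_iff]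
  exact ⟨le_trans h2b hb, h2p, fun n hn hnb hp => h2max hn (hle n hp) hp⟩

-- the separator occurs in s = I ++ sep :: E exactly at index |I|
lemma pv_sep_pos (I E : List Char) (sep : Char) (hI : sep ∉ I) (hE : sep ∉ E) (j : Nat) :
    (I ++ sep :: E)[j]? = some sep ↔ j = I.length := by
  constructor
  · intro h
    by_contra hne
    rcases Nat.lt_or_ge j I.length with hlt | hge
    · rw [List.getElem?_append_left hlt] at h
      exact hI (List.mem_of_getElem? h)
    · have hgt : I.length < j := by omega
      rw [List.getElem?_append_right (by omega),
          show j - I.length = (j - I.length - 1) + 1 by omega] at h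
      simp only [List.getElem?_cons_succ] at h
      exact hE (List.mem_of_getElem? h)
  · rintro rfl
    rw [List.getElem?_append_right le_rfl]
    simp

-- the key separator lemma: borders of I ++ sep :: E are exactly the overlaps
-- take/drop of s = I ++ sep :: E inside the two blocks
lemma pv_sep_take_drop (I E : List Char) (sep : Char) (k : Nat)
    (hkI : k ≤ I.length) (hkE : k ≤ E.length) :
    (I ++ sep :: E).take k = I.take k ∧
    (I ++ sep :: E).drop ((I ++ sep :: E).length - k) = E.drop (E.length - k) := by
  have hlen : (I ++ sep :: E).length = I.length + E.length + 1 := by simp; omega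
  refine ⟨List.take_append_of_le_length hkI, ?_⟩
  rw [hlen, List.drop_append, List.drop_eq_nil_of_le (by omega), List.nil_append,
      show I.length + E.length + 1 - k - I.length = (E.length - k) + 1 by omega]
  simp only [List.drop_succ_cons]

lemma pv_sep_border (I E : List Char) (sep : Char) (hI : sep ∉ I) (hE : sep ∉ E) (k : Nat) :
    pvPb (I ++ sep :: E) k = true ↔ pvOv E I k = true := by
  have hlen : (I ++ sep :: E).length = I.length + E.length + 1 := by simp; omega
  rw [pvPb_iff]
  unfold pvOv
  simp only [Bool.and_eq_true, decide_eq_true_eq]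
  constructor
  · rintro ⟨h1, h2⟩
    have hkI : k ≤ I.length := by
      by_contra hgt
      rw [Nat.not_le] at hgt
      have hL : ((I ++ sep :: E).take k)[I.length]? = some sep := by
        rw [List.getElem?_take, if_pos hgt, pv_sep_pos I E sep hI hE]
      rw [h2, List.getElem?_drop, pv_sep_pos I E sep hI hE] at hL
      omega
    have hkE : k ≤ E.length := by
      by_contra hgt
      rw [Nat.not_le] at hgt
      have hL : ((I ++ sep :: E).take k)[k - E.length - 1]? = some sep := by
        rw [h2, List.getElem?_drop,
            show (I ++ sep :: E).length - k + (k - E.length - 1) = I.length by omega,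
            pv_sep_pos I E sep hI hE]
      rw [List.getElem?_take, if_pos (by omega), pv_sep_pos I E sep hI hE] at hL
      omega
    obtain ⟨ht, hd⟩ := pv_sep_take_drop I E sep k hkI hkE
    rw [ht, hd] at h2
    exact ⟨⟨hkI, hkE⟩, h2⟩
  · rintro ⟨⟨hkI, hkE⟩, h2⟩
    obtain ⟨ht, hd⟩ := pv_sep_take_drop I E sep k hkI hkE
    refine ⟨by omega, ?_⟩
    rw [ht, hd, h2]

-- ===== KMP correctness =====

lemma pvKmpWhile_correct (s : List Char) (pi : List Nat) (i : Nat)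
    (hi : i < s.length)
    (hpi : ∀ j, j < i → pi.getD j 0 = pvLb (s.take (j + 1))) :
    ∀ fuel k, k ≤ fuel → pvPb (s.take i) k = true →
      (∀ m, pvPb (s.take i ++ [s.getD i ' ']) (m + 1) = true → m ≤ k) →
      pvPb (s.take i) (pvKmpWhile s pi (s.getD i ' ') fuel k) = true ∧
      (∀ m, pvPb (s.take i ++ [s.getD i ' ']) (m + 1) = true →
        m ≤ pvKmpWhile s pi (s.getD i ' ') fuel k) ∧
      (pvKmpWhile s pi (s.getD i ' ') fuel k = 0 ∨
        s.getD i ' ' = s.getD (pvKmpWhile s pi (s.getD i ' ') fuel k) ' ') := by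
  have hti : (s.take i).length = i := by rw [List.length_take]; omega
  intro fuel
  induction fuel with
  | zero =>
      intro k hk hkP hmax
      have hk0 : k = 0 := by omega
      subst hk0
      exact ⟨hkP, hmax, Or.inl rfl⟩
  | succ fuel ih =>
      intro k hk hkP hmax
      rw [pvKmpWhile]
      by_cases hc : 0 < k ∧ s.getD i ' ' ≠ s.getD k ' '
      · rw [if_pos hc]
        obtain ⟨hk0, hne⟩ := hc
        have hki : k < i := by
          have := (pvPb_iff _ _).mp hkP
          omega
        have hpik : pi.getD (k - 1) 0 = pvLb (s.take k) := by
          have h := hpi (k - 1) (by omega)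
          rwa [Nat.sub_add_cancel hk0] at h
        have hlenk : (s.take k).length = k := by rw [List.length_take]; omega
        have hkne : s.take k ≠ [] := by
          intro h
          rw [h] at hlenk
          simp at hlenk
          omega
        have hk'P : pvPb (s.take k) (pi.getD (k - 1) 0) = true := by
          rw [hpik]; exact pvLb_spec _ hkne
        obtain ⟨hk'lt, hk'b⟩ := (pvPb_iff _ _).mp hk'P
        have htakeki : (s.take i).take k = s.take k := by
          rw [List.take_take, min_eq_left (le_of_lt hki)]
        obtain ⟨hkilt, hkib⟩ := (pvPb_iff _ _).mp hkP
        -- the new candidate is a border of s.take i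
        have hk'P_i : pvPb (s.take i) (pi.getD (k - 1) 0) = true := by
          rw [pvPb_iff]
          refine ⟨by omega, ?_⟩
          apply pv_border_trans (s.take i) k _ (by omega) hkib (by omega)
          rw [htakeki]
          rw [hlenk] at hk'b
          exact hk'b
        -- maximality transfers to the new candidate
        have hmax' : ∀ m, pvPb (s.take i ++ [s.getD i ' ']) (m + 1) = true →
            m ≤ pi.getD (k - 1) 0 := by
          intro m hm
          have hmk := hmax m hm
          obtain ⟨hm1, hm2, hm3⟩ := (pv_border_snoc _ _ _).mp hm
          have hmne : m ≠ k := by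
            intro h
            subst h
            rw [List.getElem?_take, if_pos hki, List.getElem?_eq_getElem (by omega)] at hm3
            have : s.getD m ' ' = s[m] := by
              simp [List.getD, List.getElem?_eq_getElem (show m < s.length by omega)]
            rw [this] at hne
            exact hne (by injection hm3 with h'; exact h'.symm)
          have hmlt : m < k := by omega
          -- m is a border of s.take k
          have hmb : pvPb (s.take k) m = true := by
            rw [pvPb_iff, hlenk]
            refine ⟨hmlt, ?_⟩
            have := pv_border_of_border (s.take i) k m (by omega) hkib (by omega) hm2
            rw [htakeki] at this
            exact this
          rw [hpik]
          exact pvLb_is_greatest _ _ hmb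
        have hfuel : pi.getD (k - 1) 0 ≤ fuel := by
          rw [hpik]
          have := pvLb_le (s.take k)
          omega
        exact ih _ hfuel hk'P_i hmax'
      · rw [if_neg hc]
        refine ⟨hkP, hmax, ?_⟩
        by_cases hk0 : k = 0
        · exact Or.inl hk0
        · right
          by_contra hne
          exact hc ⟨Nat.pos_of_ne_zero hk0, hne⟩

lemma pvKmpStep_correct (s : List Char) (k : Nat) (pi : List Nat) (i : Nat)
    (hi : i < s.length) (hi1 : 1 ≤ i) (hlen : pi.length = s.length)
    (hk : k = pvLb (s.take i))
    (hpi : ∀ j, j < i → pi.getD j 0 = pvLb (s.take (j + 1))) :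
    (pvKmpStep s (k, pi) i).1 = pvLb (s.take (i + 1)) ∧
    (pvKmpStep s (k, pi) i).2.length = s.length ∧
    (∀ j, j < i + 1 → (pvKmpStep s (k, pi) i).2.getD j 0 = pvLb (s.take (j + 1))) := by
  have hti : (s.take i).length = i := by rw [List.length_take]; omega
  have htine : s.take i ≠ [] := by
    intro h; rw [h] at hti; simp at hti; omega
  have hci : s.getD i ' ' = s[i] := by
    simp [List.getD, List.getElem?_eq_getElem hi]
  have hsucc : s.take (i + 1) = s.take i ++ [s.getD i ' '] := by
    rw [List.take_succ, List.getElem?_eq_getElem hi, hci]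
    rfl
  -- initial invariants for the while loop
  have hkP : pvPb (s.take i) k = true := hk ▸ pvLb_spec _ htine
  have hmax0 : ∀ m, pvPb (s.take i ++ [s.getD i ' ']) (m + 1) = true → m ≤ k := by
    intro m hm
    obtain ⟨hm1, hm2, _⟩ := (pv_border_snoc _ _ _).mp hm
    rw [hk]
    exact pvLb_is_greatest _ _ ((pvPb_iff _ _).mpr ⟨by omega, hm2⟩)
  obtain ⟨h1, h2, h3⟩ := pvKmpWhile_correct s pi i hi hpi k k le_rfl hkP hmax0
  set k1 := pvKmpWhile s pi (s.getD i ' ') k k with hk1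
  obtain ⟨hk1lt, hk1b⟩ := (pvPb_iff _ _).mp h1
  have hk1i : k1 < i := by omega
  -- the new value of k is the longest proper border of s.take (i+1)
  have hnew : (if s.getD i ' ' = s.getD k1 ' ' then k1 + 1 else k1) = pvLb (s.take (i + 1)) := by
    rw [hsucc]
    by_cases heq : s.getD i ' ' = s.getD k1 ' '
    · rw [if_pos heq]
      have hk1c : (s.take i)[k1]? = some (s.getD i ' ') := by
        rw [List.getElem?_take, if_pos hk1i, List.getElem?_eq_getElem (by omega)]
        rw [heq]
        simp [List.getD, List.getElem?_eq_getElem (show k1 < s.length by omega)]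
      have hP : pvPb (s.take i ++ [s.getD i ' ']) (k1 + 1) = true :=
        (pv_border_snoc _ _ _).mpr ⟨by omega, hk1b, hk1c⟩
      unfold pvLb
      rw [show (s.take i ++ [s.getD i ' ']).length - 1 = i by simp [hti]]
      exact (pv_findGreatest_eq hP (by omega) (fun m hmb hm => by
        cases m with
        | zero => omega
        | succ m' => have := h2 m' hm; omega)).symm
    · rw [if_neg heq]
      have hk10 : k1 = 0 := by
        rcases h3 with h | h
        · exact h
        · exact absurd h heq
      rw [hk10]
      unfold pvLb
      rw [show (s.take i ++ [s.getD i ' ']).length - 1 = i by simp [hti]]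
      refine (pv_findGreatest_eq (pvPb_zero _ (by simp)) (by omega) (fun m hmb hm => ?_)).symm
      cases m with
      | zero => omega
      | succ m' =>
          exfalso
          have hm0 : m' = 0 := by have := h2 m' hm; omega
          subst hm0
          obtain ⟨hx1, _, hx3⟩ := (pv_border_snoc _ _ _).mp hm
          rw [List.getElem?_take, if_pos (by omega), List.getElem?_eq_getElem (by omega)] at hx3
          apply heq
          rw [hk10]
          injection hx3 with h'
          rw [hci, ← hci, ← h']
          simp [List.getD, List.getElem?_eq_getElem (show (0:Nat) < s.length by omega)]
  refine ⟨?_, ?_, ?_⟩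
  · simpa [pvKmpStep] using hnew
  · simp [pvKmpStep, hlen]
  · intro j hj
    simp only [pvKmpStep]
    by_cases hji : j = i
    · subst hji
      rw [List.getD, List.getElem?_set_self (by omega), Option.getD_some]
      exact hnew
    · rw [List.getD, List.getElem?_set_ne (fun h => hji h.symm), ← List.getD]
      exact hpi j (by omega)

lemma pvKmpFold_inv (s : List Char) (hs : s ≠ []) :
    ∀ m, m + 1 ≤ s.length →
      ((List.range' 1 m).foldl (pvKmpStep s) (0, List.replicate s.length 0)).1 =
        pvLb (s.take (m + 1)) ∧
      ((List.range' 1 m).foldl (pvKmpStep s) (0, List.replicate s.length 0)).2.length = s.length ∧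
      ∀ j, j < m + 1 →
        ((List.range' 1 m).foldl (pvKmpStep s) (0, List.replicate s.length 0)).2.getD j 0 =
          pvLb (s.take (j + 1)) := by
  intro m
  induction m with
  | zero =>
      intro _
      have h1 : pvLb (s.take 1) = 0 := by
        have : (s.take 1).length = 1 := by
          rw [List.length_take]
          have := List.length_pos_iff.mpr hs
          omega
        unfold pvLb
        rw [this]
        exact Nat.findGreatest_zero
      refine ⟨by simpa using h1.symm, by simp, ?_⟩
      intro j hj
      have hj0 : j = 0 := by omega
      subst hj0
      simp [List.getD, List.length_pos_iff.mpr hs, h1]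
  | succ m ih =>
      intro hm
      obtain ⟨ih1, ih2, ih3⟩ := ih (by omega)
      rw [List.range'_concat, List.foldl_append, List.foldl_cons, List.foldl_nil]
      set st := (List.range' 1 m).foldl (pvKmpStep s) (0, List.replicate s.length 0) with hst
      have h1m : 1 + 1 * m = m + 1 := by omega
      rw [h1m]
      have hstep := pvKmpStep_correct s st.1 st.2 (m + 1) (by omega) (by omega) ih2 ih1
        (fun j hj => ih3 j (by omega))
      rw [show (st.1, st.2) = st from rfl] at hstep
      exact hstep

lemma pvKmpB_eq_pvLb (s : List Char) (hs : s ≠ []) : pvKmpB s = pvLb s := by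
  have hlen : 1 ≤ s.length := List.length_pos_iff.mpr hs
  have h := (pvKmpFold_inv s hs (s.length - 1) (by omega)).1
  unfold pvKmpB
  rw [h, show s.length - 1 + 1 = s.length by omega, List.take_length]

-- ===== A-side characterisation =====

lemma pvALoop_eq (E I : List Char) (m : Nat) :
    pvALoop E I (PySem.List.pyRange (m : Int) 0 (-1)) =
      I.drop (Nat.findGreatest (fun k => PySem.Chars.endswith E (I.take k) = true) m) := by
  induction m with
  | zero =>
      rw [show ((0 : Nat) : Int) = 0 from rfl, PySem.List.pyRange_neg_one_eq_nil le_rfl]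
      simp [pvALoop]
  | succ m ih =>
      rw [PySem.List.pyRange_neg_one_cons (by positivity),
          show ((m + 1 : Nat) : Int) - 1 = (m : Int) by push_cast; ring]
      rw [pvALoop, PySem.List.slice_to_natCast I (m + 1), Nat.findGreatest_succ]
      by_cases h : PySem.Chars.endswith E (I.take (m + 1)) = true
      · rw [if_pos h, if_pos h, PySem.List.slice_from_natCast]
      · rw [if_neg h, if_neg h, ih]

lemma pv_endswith_iff (E I : List Char) (k : Nat) (hk : k ≤ I.length) :
    PySem.Chars.endswith E (I.take k) = true ↔
      (k ≤ E.length ∧ I.take k = E.drop (E.length - k)) := by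
  have hlt : (I.take k).length = k := by rw [List.length_take]; omega
  unfold PySem.Chars.endswith
  rw [List.isSuffixOf_iff_suffix]
  constructor
  · intro h
    have hle : k ≤ E.length := by
      have := h.length_le
      omega
    refine ⟨hle, ?_⟩
    have := List.suffix_iff_eq_drop.mp h
    rw [hlt] at this
    exact this
  · rintro ⟨hle, heq⟩
    rw [List.suffix_iff_eq_drop, hlt]
    exact heq

-- ===== assembling =====

lemma pv_not_mem_of_dom (s : String) (h : pvDomStr s = true) : '\x00' ∉ s.toList := by
  intro hmem
  have := List.all_eq_true.mp h _ hmem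
  simp [pvDomChar] at this

lemma pv_main (E I : List Char) (hE : '\x00' ∉ E) (hI : '\x00' ∉ I) :
    pvKmpB (I ++ '\x00' :: E) =
      Nat.findGreatest (fun k => pvOv E I k = true) (min I.length E.length) := by
  have hs : (I ++ '\x00' :: E) ≠ [] := by simp
  have hlen : (I ++ '\x00' :: E).length = I.length + E.length + 1 := by simp; omega
  rw [pvKmpB_eq_pvLb _ hs]
  unfold pvLb
  rw [show (I ++ '\x00' :: E).length - 1 = I.length + E.length by omega]
  rw [pv_findGreatest_congr (I.length + E.length)
    (fun k _ => by rw [pv_sep_border I E '\x00' hI hE k])]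
  apply pv_findGreatest_shrink
  · intro k hk
    unfold pvOv at hk
    simp only [Bool.and_eq_true, decide_eq_true_eq] at hk
    omega
  · omega

lemma pv_ports_eq (existing_text incoming_text : String)
    (hE : '\x00' ∉ existing_text.toList) (hI : '\x00' ∉ incoming_text.toList) :
    strip_reasoning_overlap_py existing_text incoming_text =
      strip_reasoning_overlap_py_alt existing_text incoming_text := by
  unfold strip_reasoning_overlap_py strip_reasoning_overlap_py_alt
  simp only []
  set E := existing_text.toList with hEdef
  set I := incoming_text.toList with hIdef
  have hmain := pv_main E I hE hI
  by_cases hIe : I = []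
  · rw [if_pos hIe, hIe]
    rw [show PySem.List.slice ([] : List Char) (some (pvKmpB ([] ++ '\x00' :: E) : Int)) none
          = ([] : List Char) by rw [PySem.List.slice_from_natCast]; simp]
  · rw [if_neg hIe]
    by_cases hEe : E = []
    · rw [if_pos hEe, hEe]
      rw [hEe] at hmain
      have hk0 : pvKmpB (I ++ ['\x00']) = 0 := by
        rw [hmain]
        simp [Nat.findGreatest_zero]
      rw [hk0]
      simp only [Nat.cast_zero, PySem.List.slice_zero_start, PySem.List.slice_none_none]
      rw [hIdef, String.ofList_toList]
    · rw [if_neg hEe]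
      have hcast : min ((E.length : Int)) ((I.length : Int)) = ((min E.length I.length : Nat) : Int) := by
        push_cast
        rfl
      have hfg : Nat.findGreatest (fun k => PySem.Chars.endswith E (I.take k) = true)
            (min E.length I.length)
          = Nat.findGreatest (fun k => pvOv E I k = true) (min I.length E.length) := by
        rw [Nat.min_comm E.length I.length]
        apply pv_findGreatest_congr
        intro k hk
        rw [pv_endswith_iff E I k (by omega)]
        unfold pvOv
        simp only [Bool.and_eq_true, decide_eq_true_eq]
        have hkI : k ≤ I.length := by omega
        tauto
      rw [hcast, pvALoop_eq E I (min E.length I.length), PySem.List.slice_from_natCast,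
          hmain, hfg]

-- ===== VERDICT (by name: the statement is the Claim_ definition above) =====
theorem strip_reasoning_overlap_py_spec : Claim_equal_strip_reasoning_overlap_py := by
  intro existing_text incoming_text hdom
  unfold Spec_strip_reasoning_overlap_py
  have hdom' : pvDomStr existing_text = true ∧ pvDomStr incoming_text = true := by
    have h := hdom
    unfold Dom_strip_reasoning_overlap_py at h
    simpa using h
  exact pv_ports_eq existing_text incoming_text
    (pv_not_mem_of_dom _ hdom'.1) (pv_not_mem_of_dom _ hdom'.2)
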